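-- pv_equiv track=rewrite | github.com/JungSeong/Data-Structure-Algorithm | Python3/프로그래머스/3/42579. 베스트앨범/베스트앨범.py | solution
-- ===== SOURCE A (Python) =====
-- from collections import defaultdict
--
-- def solution(genres, plays):
--     answer = []
--     d = defaultdict(list)
--     cnt = defaultdict(int)
--
--     for i, genre in enumerate(genres) :
--         d[genre].append([plays[i], i])
--         cnt[genre] += plays[i]
--
--     # 먼저 들어갈 장르 결정
--     sorted_cnt = sorted(cnt.items(), key = lambda x : x[1], reverse=True)
--
--     for cnt in sorted_cnt :
--         genre = cnt[0]
--         # 장르에 속한 곡이 하나인 경우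
--         if len(d[genre]) == 1 : answer.append(d[genre][0][1])
--         else : # 하나 이상인 경우
--             selected = d[genre]
--             sorted_selected = sorted(selected, key = lambda x : (-x[0], x[1]))
--             top_2 = sorted_selected[:2]
--
--             for t in top_2 :
--                 answer.append(t[1])
--
--     return answer
-- ===== SOURCE B (Python) =====
-- def solution(genres, plays):
--     totals = {}
--     top = {}
--     for i, g in enumerate(genres):
--         totals[g] = totals.get(g, 0) + plays[i]
--         t = top.get(g, [])
--         e = (plays[i], i)
--         placed = False
--         for j in range(len(t)):
--             if e[0] > t[j][0] or (e[0] == t[j][0] and e[1] < t[j][1]):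
--                 t.insert(j, e)
--                 placed = True
--                 break
--         if not placed:
--             t.append(e)
--         top[g] = t[:2]
--     order = sorted(totals.items(), key=lambda kv: kv[1], reverse=True)
--     return [idx for g, _ in order for _, idx in top[g]]
-- ===== Notes on version B (the rewrite author's own statement) =====
-- stated objective: alternative
-- what changed: Replaces the per-genre full sort of all songs with an in-loop bounded insertion that maintains only the top-2 songs per genre (capped insert into a length-2 list), so no per-genre song list is ever built or sorted.
import Mathlib
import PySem

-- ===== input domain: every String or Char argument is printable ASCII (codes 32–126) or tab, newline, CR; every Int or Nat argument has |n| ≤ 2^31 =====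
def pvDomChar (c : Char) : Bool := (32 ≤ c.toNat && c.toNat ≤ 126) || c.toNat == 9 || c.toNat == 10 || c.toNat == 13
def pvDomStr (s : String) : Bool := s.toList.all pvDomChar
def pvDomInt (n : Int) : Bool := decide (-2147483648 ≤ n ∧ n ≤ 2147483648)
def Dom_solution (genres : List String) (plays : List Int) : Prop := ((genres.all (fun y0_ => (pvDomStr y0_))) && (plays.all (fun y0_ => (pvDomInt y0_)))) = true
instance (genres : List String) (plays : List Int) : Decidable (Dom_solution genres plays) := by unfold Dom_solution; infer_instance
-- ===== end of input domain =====

-- B replaces A's per-genre full sort of the song list with a bounded insertion that keeps only the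
-- top-2 songs per genre while streaming the input once; same return value (no argument is mutated).


-- ===== PORT A =====
def solution (genres : List String) (plays : List Int) : List Int :=
  -- d = defaultdict(list); cnt = defaultdict(int); for i, genre in enumerate(genres): …
  let st := (PySem.List.enumerate genres 0).foldl
    (fun (st : PySem.Dict String (List (Int × Int)) × PySem.Dict String Int) p =>
      (st.1.modify p.2 [] (fun l => l ++ [(PySem.List.pyGetD plays p.1 0, p.1)]),
       st.2.modify p.2 0 (fun c => c + PySem.List.pyGetD plays p.1 0)))
    (PySem.Dict.empty, PySem.Dict.empty)
  let d := st.1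
  let cnt := st.2
  let sorted_cnt := PySem.List.sorted cnt.items (fun x => x.2) true
  sorted_cnt.foldl
    (fun answer c =>
      let genre := c.1
      if (d.getD genre []).length == 1 then
        answer ++ [(PySem.List.pyGetD (d.getD genre []) 0 (0, 0)).2]
      else
        let selected := d.getD genre []
        let sorted_selected := PySem.List.sorted2 selected (fun x => -x.1) (fun x => x.2) false
        let top_2 := PySem.List.slice sorted_selected none (some 2)
        top_2.foldl (fun ans t => ans ++ [t.2]) answer)
    []

-- ===== PORT B =====
-- the ranking test of Source B's inner insertion loop: more plays, or equal plays and lower index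
def bBefore (e y : Int × Int) : Bool := decide (e.1 > y.1) || (decide (e.1 = y.1) && decide (e.2 < y.2))

def solution_alt (genres : List String) (plays : List Int) : List Int :=
  -- totals = {}; top = {}; for i, g in enumerate(genres): …  (capped insert = insertBy then [:2])
  let st := (PySem.List.enumerate genres 0).foldl
    (fun (st : PySem.Dict String Int × PySem.Dict String (List (Int × Int))) p =>
      (st.1.modify p.2 0 (fun c => c + PySem.List.pyGetD plays p.1 0),
       st.2.modify p.2 [] (fun t =>
         PySem.List.slice (PySem.List.insertBy bBefore (PySem.List.pyGetD plays p.1 0, p.1) t) none (some 2))))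
    (PySem.Dict.empty, PySem.Dict.empty)
  let order := PySem.List.sorted st.1.items (fun kv => kv.2) true
  order.flatMap (fun c => (st.2.getD c.1 []).map (fun e => e.2))

-- ===== PRECONDITION & SPEC =====
-- A raises IndexError (plays[i]) exactly when plays is shorter than genres
def Pre_solution (genres : List String) (plays : List Int) : Prop := genres.length ≤ plays.length
instance (genres : List String) (plays : List Int) : Decidable (Pre_solution genres plays) := by unfold Pre_solution; infer_instance
def pvWitness_solution : List String × List Int := (["a", "b", "a", "b"], [5, 6, 5, 4])

def Spec_solution (genres : List String) (plays : List Int) (out : List Int) : Prop := out = solution_alt genres plays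
instance (genres : List String) (plays : List Int) (out : List Int) : Decidable (Spec_solution genres plays out) := by unfold Spec_solution; infer_instance

-- ===== CLAIM (what is proved, stated in full; the proofs are below) =====
def Claim_equal_solution : Prop := ∀ (genres : List String) (plays : List Int), Dom_solution genres plays → Pre_solution genres plays → Spec_solution genres plays (solution genres plays)

-- ===== LEMMAS AND PROOFS =====

-- A's lexicographic sort key (-plays, index) induces exactly Source B's ranking test
lemma before_eq :
    (fun a b : Int × Int => (decide ((fun x : Int × Int => -x.1) a < (fun x : Int × Int => -x.1) b) ||
      (!decide ((fun x : Int × Int => -x.1) b < (fun x : Int × Int => -x.1) a) &&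
        decide ((fun x : Int × Int => x.2) a < (fun x : Int × Int => x.2) b)))) = bBefore := by
  funext a b
  simp only [bBefore, gt_iff_lt]
  by_cases h1 : a.1 < b.1 <;> by_cases h2 : b.1 < a.1 <;> by_cases h3 : a.2 < b.2 <;>
    simp [h1, h2, h3] <;> omega

-- truncating to the first n elements commutes with insertBy
lemma insertBy_take {α : Type} (before : α → α → Bool) (x : α) :
    ∀ (n : Nat) (s : List α),
      (PySem.List.insertBy before x s).take n = (PySem.List.insertBy before x (s.take n)).take n := by
  intro n s
  induction s generalizing n with
  | nil => simp
  | cons y ys ih =>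
    cases n with
    | zero => simp
    | succ m =>
      by_cases h : before x y
      · cases m with
        | zero => simp [PySem.List.insertBy, h]
        | succ k => simp [PySem.List.insertBy, h, List.take_take]
      · simp [PySem.List.insertBy, h, ih m]

-- an insertion sort consumed through take 2 IS the capped top-2 insertion loop
lemma foldl_insertBy_take2 {α : Type} (before : α → α → Bool) :
    ∀ (l : List α) (s : List α),
      (l.foldl (fun acc x => PySem.List.insertBy before x acc) s).take 2 =
        l.foldl (fun acc x => (PySem.List.insertBy before x acc).take 2) (s.take 2) := by
  intro l
  induction l with
  | nil => intro s; rfl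
  | cons x xs ih =>
    intro s
    simp only [List.foldl_cons]
    rw [ih, insertBy_take]

-- B's per-genre state update, named
def bStep (acc : List (Int × Int)) (x : Int × Int) : List (Int × Int) :=
  (PySem.List.insertBy bBefore x acc).take 2

-- dict invariant: B's top dict holds the capped fold of A's per-genre song list, for every genre
lemma dict_inv (plays : List Int) :
    ∀ (L : List (Int × String)) (d t : PySem.Dict String (List (Int × Int))),
      (∀ g, t.getD g [] = (d.getD g []).foldl bStep []) →
      ∀ g,
        (L.foldl (fun t p => t.modify p.2 [] (fun l =>
            PySem.List.slice (PySem.List.insertBy bBefore (PySem.List.pyGetD plays p.1 0, p.1) l) none (some 2))) t).getD g [] =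
        ((L.foldl (fun d p => d.modify p.2 [] (fun l => l ++ [(PySem.List.pyGetD plays p.1 0, p.1)])) d).getD g []).foldl bStep [] := by
  intro L
  induction L with
  | nil => intro d t h g; exact h g
  | cons p L ih =>
    intro d t h g
    simp only [List.foldl_cons]
    apply ih
    intro g'
    rw [PySem.Dict.getD_modify, PySem.Dict.getD_modify]
    by_cases hg : g' = p.2
    · subst hg
      rw [if_pos rfl, if_pos rfl, h p.2, List.foldl_append]
      rw [show ((2 : Int)) = ((2 : Nat) : Int) from by norm_num, PySem.List.slice_to_natCast]
      rfl
    · simp [hg, h g']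

-- A's per-genre chunk (single-song branch or sorted[:2]) equals B's capped fold, mapped to indices
lemma chunk_eq (l : List (Int × Int)) :
    (if l.length == 1 then [(PySem.List.pyGetD l 0 (0, 0)).2]
     else (PySem.List.slice (PySem.List.sorted2 l (fun x => -x.1) (fun x => x.2) false) none (some 2)).map (fun e => e.2)) =
    (l.foldl bStep []).map (fun e => e.2) := by
  have hsort : PySem.List.sorted2 l (fun x : Int × Int => -x.1) (fun x => x.2) false =
      l.foldl (fun acc x => PySem.List.insertBy bBefore x acc) [] := by
    simp only [PySem.List.sorted2, Bool.false_eq_true, if_false]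
    rw [before_eq]
  have hfold : (PySem.List.slice (PySem.List.sorted2 l (fun x : Int × Int => -x.1) (fun x => x.2) false) none (some 2)) =
      l.foldl bStep [] := by
    rw [hsort]
    have h2 : ((2 : Int)) = ((2 : Nat) : Int) := by norm_num
    rw [h2, PySem.List.slice_to_natCast]
    rw [foldl_insertBy_take2]
    rfl
  by_cases h1 : l.length = 1
  · match l, h1 with
    | [x], _ =>
      simp [PySem.List.pyGetD_zero_cons, bStep, PySem.List.insertBy]
  · have : (l.length == 1) = false := by simp [h1]
    rw [this]
    simp only [Bool.false_eq_true, if_false]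
    rw [hfold]

-- a fold appending one computed chunk per item is the flatMap of the chunks
lemma foldl_chunks {A C : Type} (f : List C → A → List C) (g : A → List C)
    (hfg : ∀ acc c, f acc c = acc ++ g c) :
    ∀ (lst : List A) (acc : List C), lst.foldl f acc = acc ++ lst.flatMap g := by
  intro lst
  induction lst with
  | nil => intro acc; simp
  | cons c lst ih => intro acc; simp [ih, hfg]

-- ===== VERDICT (by name: the statement is the Claim_ definition above) =====
theorem solution_spec : Claim_equal_solution := by
  intro genres plays _ _
  unfold Spec_solution solution solution_alt
  simp only []
  rw [PySem.List.foldl_prod_mk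
      (f := fun (d : PySem.Dict String (List (Int × Int))) (p : Int × String) =>
        d.modify p.2 [] (fun l => l ++ [(PySem.List.pyGetD plays p.1 0, p.1)]))
      (g := fun (c : PySem.Dict String Int) (p : Int × String) =>
        c.modify p.2 0 (fun v => v + PySem.List.pyGetD plays p.1 0))]
  rw [PySem.List.foldl_prod_mk
      (f := fun (c : PySem.Dict String Int) (p : Int × String) =>
        c.modify p.2 0 (fun v => v + PySem.List.pyGetD plays p.1 0))
      (g := fun (t : PySem.Dict String (List (Int × Int))) (p : Int × String) =>
        t.modify p.2 [] (fun l =>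
          PySem.List.slice (PySem.List.insertBy bBefore (PySem.List.pyGetD plays p.1 0, p.1) l) none (some 2)))]
  dsimp only
  set L := PySem.List.enumerate genres 0 with hL
  set D := L.foldl (fun (d : PySem.Dict String (List (Int × Int))) (p : Int × String) =>
    d.modify p.2 [] (fun l => l ++ [(PySem.List.pyGetD plays p.1 0, p.1)])) PySem.Dict.empty with hD
  set T := L.foldl (fun (t : PySem.Dict String (List (Int × Int))) (p : Int × String) =>
    t.modify p.2 [] (fun l =>
      PySem.List.slice (PySem.List.insertBy bBefore (PySem.List.pyGetD plays p.1 0, p.1) l) none (some 2))) PySem.Dict.empty with hT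
  have hinv : ∀ g, T.getD g [] = (D.getD g []).foldl bStep [] := by
    intro g
    rw [hT, hD]
    exact dict_inv plays L PySem.Dict.empty PySem.Dict.empty (fun g' => by simp) g
  have hbody : ∀ (acc : List Int) (c : String × Int),
      (if (D.getD c.1 []).length == 1 then
        acc ++ [(PySem.List.pyGetD (D.getD c.1 []) 0 (0, 0)).2]
      else
        (PySem.List.slice (PySem.List.sorted2 (D.getD c.1 []) (fun x => -x.1) (fun x => x.2) false) none (some 2)).foldl
          (fun ans t => ans ++ [t.2]) acc) =
      acc ++ (T.getD c.1 []).map (fun e => e.2) := by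
    intro acc c
    rw [hinv c.1, ← chunk_eq (D.getD c.1 [])]
    by_cases h1 : ((D.getD c.1 []).length == 1) = true
    · rw [if_pos h1, if_pos h1]
    · rw [if_neg h1, if_neg h1, PySem.List.foldl_append_singleton_eq_map]
  rw [foldl_chunks _ _ hbody]
  simp
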